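-- pv_equiv track=rewrite | github.com/minghong/stLFR_binner | python_code/tmp.py | cal_union_1
-- ===== SOURCE A (Python) =====
-- def cal_union_1(dict1, dict2):
--     list1 = dict1.keys()
--     list2 = dict2.keys()
--
--     union_num = 0
--     t_union = list(set(list1).union(set(list2)))
--
--     for barcode in t_union:
--         if barcode in list1 and barcode in list2:
--             union_num = union_num + max(dict1[barcode], dict2[barcode])
--         elif barcode in list1 and barcode not in list2:
--             union_num = union_num + dict1[barcode]
--         else:
--             union_num = union_num + dict2[barcode]
--
--     return union_num
-- ===== SOURCE B (Python) =====
-- def cal_union_1(dict1, dict2):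
--     common = dict1.keys() & dict2.keys()
--     return sum(dict1.values()) + sum(dict2.values()) - sum(min(dict1[k], dict2[k]) for k in common)
-- ===== Notes on version B (the rewrite author's own statement) =====
-- stated objective: simpler
-- what changed: Replaces the per-key three-branch loop over the set union with an inclusion-exclusion identity: total of both dicts' values minus the sum of the smaller value over the key intersection.
import Mathlib
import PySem

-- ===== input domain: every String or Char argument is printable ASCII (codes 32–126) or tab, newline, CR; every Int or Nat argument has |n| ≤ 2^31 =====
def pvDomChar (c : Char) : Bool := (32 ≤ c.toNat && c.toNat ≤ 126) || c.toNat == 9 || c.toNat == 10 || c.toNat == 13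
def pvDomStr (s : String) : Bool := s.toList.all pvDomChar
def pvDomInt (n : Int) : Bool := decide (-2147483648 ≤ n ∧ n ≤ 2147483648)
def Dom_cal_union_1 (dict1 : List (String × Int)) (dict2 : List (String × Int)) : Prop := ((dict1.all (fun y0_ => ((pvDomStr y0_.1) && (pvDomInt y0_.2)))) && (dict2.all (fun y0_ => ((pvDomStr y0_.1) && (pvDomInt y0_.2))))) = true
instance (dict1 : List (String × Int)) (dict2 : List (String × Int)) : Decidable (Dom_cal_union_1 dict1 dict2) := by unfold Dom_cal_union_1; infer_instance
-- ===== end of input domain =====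

-- B replaces A's three-branch loop over the key union by the inclusion-exclusion identity
-- sum(values1) + sum(values2) - sum of min over the key intersection (same cost, simpler).


-- ===== PORT A =====
def cal_union_1 (dict1 : List (String × Int)) (dict2 : List (String × Int)) : Int :=
  let d1 := PySem.Dict.mk dict1
  let d2 := PySem.Dict.mk dict2
  let list1 := d1.keys
  let list2 := d2.keys
  let tUnion := PySem.Set.union (PySem.Set.ofList list1) (PySem.Set.ofList list2)
  tUnion.foldl (fun unionNum barcode =>
    if barcode ∈ list1 ∧ barcode ∈ list2 then
      unionNum + max (d1.getD barcode 0) (d2.getD barcode 0)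
    else if barcode ∈ list1 ∧ barcode ∉ list2 then
      unionNum + d1.getD barcode 0
    else
      unionNum + d2.getD barcode 0) 0

-- ===== PORT B =====
def cal_union_1_alt (dict1 : List (String × Int)) (dict2 : List (String × Int)) : Int :=
  let d1 := PySem.Dict.mk dict1
  let d2 := PySem.Dict.mk dict2
  let common := PySem.Set.inter (PySem.Set.ofList d1.keys) (PySem.Set.ofList d2.keys)
  d1.values.sum + d2.values.sum
    - (common.map (fun k => min (d1.getD k 0) (d2.getD k 0))).sum

-- ===== PRECONDITION & SPEC =====
-- Pre_ excludes association lists with duplicate keys: they do not represent any Python dict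
-- (the Python arguments are dicts, whose keys are unique), so A is never run on them.
def Pre_cal_union_1 (dict1 : List (String × Int)) (dict2 : List (String × Int)) : Prop :=
  (dict1.map Prod.fst).Nodup ∧ (dict2.map Prod.fst).Nodup
instance (dict1 : List (String × Int)) (dict2 : List (String × Int)) : Decidable (Pre_cal_union_1 dict1 dict2) := by unfold Pre_cal_union_1; infer_instance

def pvWitness_cal_union_1 : (List (String × Int)) × (List (String × Int)) :=
  ([("a", 2), ("c", 5)], [("a", 1), ("b", 3)])

def Spec_cal_union_1 (dict1 : List (String × Int)) (dict2 : List (String × Int)) (out : Int) : Prop := out = cal_union_1_alt dict1 dict2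
instance (dict1 : List (String × Int)) (dict2 : List (String × Int)) (out : Int) : Decidable (Spec_cal_union_1 dict1 dict2 out) := by unfold Spec_cal_union_1; infer_instance

-- ===== CLAIM (what is proved, stated in full; the proofs are below) =====
def Claim_equal_cal_union_1 : Prop := ∀ (dict1 : List (String × Int)) (dict2 : List (String × Int)), Dom_cal_union_1 dict1 dict2 → Pre_cal_union_1 dict1 dict2 → Spec_cal_union_1 dict1 dict2 (cal_union_1 dict1 dict2)

-- ===== LEMMAS AND PROOFS =====

-- The inclusion-exclusion identity on Finset sums that separates the two algorithms.
theorem pv_incl_excl (S1 S2 : Finset String) (g1 g2 : String → Int) :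
    (∑ x ∈ S1 ∪ S2, (if x ∈ S1 ∧ x ∈ S2 then max (g1 x) (g2 x)
                     else if x ∈ S1 ∧ x ∉ S2 then g1 x else g2 x))
      = (∑ x ∈ S1, g1 x) + (∑ x ∈ S2, g2 x)
        - ∑ x ∈ S1 ∩ S2, min (g1 x) (g2 x) := by
  have hcongr : ∀ x ∈ S1 ∪ S2,
      (if x ∈ S1 ∧ x ∈ S2 then max (g1 x) (g2 x)
       else if x ∈ S1 ∧ x ∉ S2 then g1 x else g2 x)
        = (if x ∈ S1 then g1 x else 0) + (if x ∈ S2 then g2 x else 0)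
          - (if x ∈ S1 ∩ S2 then min (g1 x) (g2 x) else 0) := by
    intro x hx
    rcases Finset.mem_union.mp hx with h | h <;>
      by_cases h1 : x ∈ S1 <;> by_cases h2 : x ∈ S2 <;>
      simp_all [Finset.mem_inter] <;> omega
  rw [Finset.sum_congr rfl hcongr, Finset.sum_sub_distrib, Finset.sum_add_distrib]
  rw [Finset.sum_ite_mem, Finset.sum_ite_mem, Finset.sum_ite_mem]
  rw [Finset.union_inter_cancel_left, Finset.union_inter_cancel_right,
      Finset.inter_eq_right.mpr (by exact Finset.inter_subset_union)]

-- A's branch-loop over the key union equals B's three aggregations, for Nodup key lists.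
theorem pv_main (K1 K2 : List String) (g1 g2 : String → Int)
    (h1 : K1.Nodup) (h2 : K2.Nodup) :
    (PySem.Set.union (PySem.Set.ofList K1) (PySem.Set.ofList K2)).foldl
      (fun unionNum barcode =>
        if barcode ∈ K1 ∧ barcode ∈ K2 then unionNum + max (g1 barcode) (g2 barcode)
        else if barcode ∈ K1 ∧ barcode ∉ K2 then unionNum + g1 barcode
        else unionNum + g2 barcode) 0
      = (K1.map g1).sum + (K2.map g2).sum
        - ((PySem.Set.inter (PySem.Set.ofList K1) (PySem.Set.ofList K2)).map
            (fun k => min (g1 k) (g2 k))).sum := by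
  have e1 : PySem.Set.ofList K1 = K1 := PySem.Set.ofList_eq_self_of_nodup K1 h1
  have e2 : PySem.Set.ofList K2 = K2 := PySem.Set.ofList_eq_self_of_nodup K2 h2
  rw [e1, e2]
  have hfun : (fun (unionNum : Int) (barcode : String) =>
      if barcode ∈ K1 ∧ barcode ∈ K2 then unionNum + max (g1 barcode) (g2 barcode)
      else if barcode ∈ K1 ∧ barcode ∉ K2 then unionNum + g1 barcode
      else unionNum + g2 barcode)
      = (fun unionNum barcode => unionNum +
          (if barcode ∈ K1 ∧ barcode ∈ K2 then max (g1 barcode) (g2 barcode)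
           else if barcode ∈ K1 ∧ barcode ∉ K2 then g1 barcode else g2 barcode)) := by
    funext a b; split_ifs <;> rfl
  rw [hfun, PySem.List.foldl_add, zero_add]
  have hU : (PySem.Set.union K1 K2).Nodup := PySem.Set.nodup_union K1 K2 h1
  have hI : (PySem.Set.inter K1 K2).Nodup := PySem.Set.nodup_inter K1 K2 h1
  rw [← List.sum_toFinset _ hU, ← List.sum_toFinset _ h1, ← List.sum_toFinset _ h2,
      ← List.sum_toFinset _ hI]
  have hUf : (PySem.Set.union K1 K2).toFinset = K1.toFinset ∪ K2.toFinset := by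
    ext x; simp [PySem.Set.mem_union]
  have hIf : (PySem.Set.inter K1 K2).toFinset = K1.toFinset ∩ K2.toFinset := by
    ext x; simp [PySem.Set.mem_inter]
  rw [hUf, hIf]
  have := pv_incl_excl K1.toFinset K2.toFinset g1 g2
  simp only [List.mem_toFinset] at this
  simpa using this

-- ===== VERDICT (by name: the statement is the Claim_ definition above) =====
theorem cal_union_1_spec : Claim_equal_cal_union_1 := by
  intro dict1 dict2 _ hpre
  obtain ⟨h1, h2⟩ := hpre
  have hk1 : (PySem.Dict.mk dict1).keys.Nodup := by simpa [PySem.Dict.keys] using h1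
  have hk2 : (PySem.Dict.mk dict2).keys.Nodup := by simpa [PySem.Dict.keys] using h2
  unfold Spec_cal_union_1 cal_union_1 cal_union_1_alt
  dsimp only
  have ev1 : (PySem.Dict.mk dict1).values
      = (PySem.Dict.mk dict1).keys.map (fun k => (PySem.Dict.mk dict1).getD k 0) :=
    PySem.Dict.values_eq_map_keys (PySem.Dict.mk dict1) hk1 0
  have ev2 : (PySem.Dict.mk dict2).values
      = (PySem.Dict.mk dict2).keys.map (fun k => (PySem.Dict.mk dict2).getD k 0) :=
    PySem.Dict.values_eq_map_keys (PySem.Dict.mk dict2) hk2 0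
  rw [ev1, ev2]
  exact pv_main (PySem.Dict.mk dict1).keys (PySem.Dict.mk dict2).keys
    (fun k => (PySem.Dict.mk dict1).getD k 0) (fun k => (PySem.Dict.mk dict2).getD k 0)
    hk1 hk2
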